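-- pv_equiv track=rewrite | github.com/kanngji/thisisCodingTest | 프로그래머스/lv0/배열조각하기.py | solution
-- ===== SOURCE A (Python) =====
-- def solution(arr, query):
--     answer = []
--     for i in range(len(query)):
--         if i%2==0:
--             arr=arr[0:query[i]+1:]
--
--         elif i%2==1:
--             arr=arr[query[i]:]
--
--     return arr
-- ===== SOURCE B (Python) =====
-- def solution(arr, query):
--     # Track offsets into the original list and slice once at the end.
--     lo, hi = 0, len(arr)
--     for i, q in enumerate(query):
--         n = hi - lo
--         s = q + 1 if i % 2 == 0 else q
--         if s < 0:
--             s += n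
--         if s < 0:
--             s = 0
--         elif s > n:
--             s = n
--         if i % 2 == 0:
--             hi = lo + s
--         else:
--             lo = lo + s
--     return arr[lo:hi]
-- ===== Notes on version B (the rewrite author's own statement) =====
-- stated objective: alternative
-- what changed: Instead of materialising a new list on every query as A does, B keeps two integer offsets lo/hi, updates them in O(1) per query with Python's slice-clamping rules, and performs a single final slice.
import Mathlib
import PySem

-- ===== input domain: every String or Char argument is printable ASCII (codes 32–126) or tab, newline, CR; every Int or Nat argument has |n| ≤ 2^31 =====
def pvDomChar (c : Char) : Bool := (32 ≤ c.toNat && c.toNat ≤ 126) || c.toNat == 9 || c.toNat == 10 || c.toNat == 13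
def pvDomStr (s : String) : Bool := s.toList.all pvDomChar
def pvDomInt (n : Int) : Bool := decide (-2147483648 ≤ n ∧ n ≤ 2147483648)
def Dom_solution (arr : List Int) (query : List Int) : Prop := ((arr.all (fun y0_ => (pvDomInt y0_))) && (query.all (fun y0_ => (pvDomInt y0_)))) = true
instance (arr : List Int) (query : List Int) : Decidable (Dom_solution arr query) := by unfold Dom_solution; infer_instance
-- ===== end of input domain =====

-- B replaces A's repeated list slicing by offset updates and one final slice.

-- ===== PORT A =====
-- for i in range(len(query)): even i: arr = arr[0:query[i]+1]; odd i: arr = arr[query[i]:]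
def solution (arr : List Int) (query : List Int) : List Int :=
  (PySem.List.pyRange 0 (query.length : Int) 1).foldl
    (fun a i =>
      if PySem.Int.mod i 2 == 0 then
        PySem.List.slice a (some 0) (some (PySem.List.pyGetD query i 0 + 1))
      else if PySem.Int.mod i 2 == 1 then
        PySem.List.slice a (some (PySem.List.pyGetD query i 0)) none
      else a) arr

-- ===== PORT B =====
-- lo/hi offsets, Python slice-bound clamping done by hand, one final slice.
def solution_alt (arr : List Int) (query : List Int) : List Int :=
  let st :=
    (PySem.List.enumerate query 0).foldl
      (fun (st : Int × Int) iq =>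
        let lo := st.1
        let hi := st.2
        let n := hi - lo
        let s := if PySem.Int.mod iq.1 2 == 0 then iq.2 + 1 else iq.2
        let s := if s < 0 then s + n else s
        let s := if s < 0 then 0 else if s > n then n else s
        if PySem.Int.mod iq.1 2 == 0 then (lo, lo + s) else (lo + s, hi))
      (0, (arr.length : Int))
  PySem.List.slice arr (some st.1) (some st.2)

-- ===== PRECONDITION & SPEC =====
def Spec_solution (arr : List Int) (query : List Int) (out : List Int) : Prop := out = solution_alt arr query
instance (arr : List Int) (query : List Int) (out : List Int) : Decidable (Spec_solution arr query out) := by unfold Spec_solution; infer_instance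

-- ===== CLAIM (what is proved, stated in full; the proofs are below) =====
def Claim_equal_solution : Prop := ∀ (arr : List Int) (query : List Int), Dom_solution arr query → Spec_solution arr query (solution arr query)

-- ===== LEMMAS AND PROOFS =====

-- Abstract form of A's loop: alternate take-style / drop-style Python slices.
def goA : List Int → Bool → List Int → List Int
  | [], _, a => a
  | x :: q, true, a => goA q false (PySem.List.slice a (some 0) (some (x + 1)))
  | x :: q, false, a => goA q true (PySem.List.slice a (some x) none)

-- Abstract form of B's loop on the offset pair.
def goB : List Int → Bool → Int → Int → Int × Int
  | [], _, lo, hi => (lo, hi)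
  | x :: q, ev, lo, hi =>
    let n := hi - lo
    let s := if ev then x + 1 else x
    let s := if s < 0 then s + n else s
    let s := if s < 0 then 0 else if s > n then n else s
    if ev then goB q false lo (lo + s) else goB q true (lo + s) hi

lemma slice_zero_some (xs : List Int) (b : Int) :
    PySem.List.slice xs (some 0) (some b) = xs.take (PySem.List.clampIdx xs.length b) := by
  simp [PySem.List.slice, PySem.List.clampIdx]

-- A's index loop equals goA (peel the range from the left, prefix p tracks the index).
lemma A_loop (q p arr0 : List Int) (Q : List Int) (hQ : Q = p ++ q) :
    (PySem.List.pyRange (p.length : Int) ((p.length : Int) + (q.length : Int)) 1).foldl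
      (fun a i =>
        if PySem.Int.mod i 2 == 0 then
          PySem.List.slice a (some 0) (some (PySem.List.pyGetD Q i 0 + 1))
        else if PySem.Int.mod i 2 == 1 then
          PySem.List.slice a (some (PySem.List.pyGetD Q i 0)) none
        else a) arr0
    = goA q (p.length % 2 == 0) arr0 := by
  induction q generalizing p arr0 with
  | nil =>
    rw [PySem.List.pyRange_one_eq_nil (by simp)]
    simp [goA]
  | cons x q ih =>
    rw [PySem.List.pyRange_one_cons (by simp)]
    simp only [List.foldl_cons]
    have hget : PySem.List.pyGetD Q ((p.length : Nat) : Int) 0 = x := by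
      subst hQ
      rw [PySem.List.pyGetD_natCast]
      simp
    have hmod : PySem.Int.mod ((p.length : Nat) : Int) 2 = ((p.length % 2 : Nat) : Int) :=
      PySem.Int.mod_natCast _ 2
    have hkey := ih (p ++ [x]) (hQ := by rw [hQ]; simp)
    have e1 : (((p ++ [x]).length : Nat) : Int) = ((p.length : Nat) : Int) + 1 := by
      simp
    have e2 : (((p ++ [x]).length : Nat) : Int) + ((q.length : Nat) : Int)
        = ((p.length : Nat) : Int) + (((x :: q).length : Nat) : Int) := by
      simp; ring
    rcases Nat.mod_two_eq_zero_or_one p.length with h2 | h2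
    · have hpar : ((p ++ [x]).length % 2 == 0) = false := by
        simp [List.length_append, Nat.add_mod, h2]
      have := hkey (PySem.List.slice arr0 (some 0) (some (x + 1)))
      rw [e2, e1, hpar] at this
      rw [hget, hmod, h2]
      simpa [goA, h2] using this
    · have hpar : ((p ++ [x]).length % 2 == 0) = true := by
        simp [List.length_append, Nat.add_mod, h2]
      have := hkey (PySem.List.slice arr0 (some x) none)
      rw [e2, e1, hpar] at this
      rw [hget, hmod, h2]
      simpa [goA, h2] using this

-- B's enumerate loop equals goB.
lemma B_loop (q : List Int) (s : Nat) (lo hi : Int) :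
    (PySem.List.enumerate q (s : Int)).foldl
      (fun (st : Int × Int) iq =>
        let lo := st.1
        let hi := st.2
        let n := hi - lo
        let s := if PySem.Int.mod iq.1 2 == 0 then iq.2 + 1 else iq.2
        let s := if s < 0 then s + n else s
        let s := if s < 0 then 0 else if s > n then n else s
        if PySem.Int.mod iq.1 2 == 0 then (lo, lo + s) else (lo + s, hi)) (lo, hi)
    = goB q (s % 2 == 0) lo hi := by
  induction q generalizing s lo hi with
  | nil => simp [goB, PySem.List.enumerate]
  | cons x q ih =>
    rw [PySem.List.enumerate_cons]
    simp only [List.foldl_cons]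
    have hmod : PySem.Int.mod ((s : Nat) : Int) 2 = ((s % 2 : Nat) : Int) :=
      PySem.Int.mod_natCast _ 2
    have hs1 : ((s : Nat) : Int) + 1 = (((s + 1 : Nat)) : Int) := by push_cast; ring
    rcases Nat.mod_two_eq_zero_or_one s with h2 | h2
    · have hpar : ((s + 1) % 2 == 0) = false := by simp [Nat.add_mod, h2]
      have := ih (s + 1)
      rw [hpar] at this
      simp only [hmod, h2, hs1]
      rw [this]
      simp [goB]
    · have hpar : ((s + 1) % 2 == 0) = true := by simp [Nat.add_mod, h2]
      have := ih (s + 1)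
      rw [hpar] at this
      simp only [hmod, h2, hs1]
      rw [this]
      simp [goB]

-- B's hand clamping (shift negatives, clamp to [0,n]) is exactly Python's clampIdx.
lemma clampStep (lo n : Nat) (b : Int) :
    ((lo : Int) +
      (if (if b < 0 then b + (n : Int) else b) < 0 then 0
       else if (if b < 0 then b + (n : Int) else b) > (n : Int) then (n : Int)
       else (if b < 0 then b + (n : Int) else b)))
    = (((lo + PySem.List.clampIdx n b : Nat)) : Int) := by
  simp only [PySem.List.clampIdx]
  split_ifs <;> omega

-- The heart: goA on the current segment = the segment cut out by goB's offsets.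
lemma goA_goB (arr : List Int) :
    ∀ (q : List Int) (ev : Bool) (lo hi : Nat), lo ≤ hi → hi ≤ arr.length →
      ∃ lo2 hi2 : Nat,
        goB q ev (lo : Int) (hi : Int) = ((lo2 : Int), (hi2 : Int)) ∧
        lo2 ≤ hi2 ∧ hi2 ≤ arr.length ∧
        goA q ev ((arr.drop lo).take (hi - lo)) = (arr.drop lo2).take (hi2 - lo2) := by
  intro q
  induction q with
  | nil =>
    intro ev lo hi h1 h2
    exact ⟨lo, hi, rfl, h1, h2, rfl⟩
  | cons x q ih =>
    intro ev lo hi h1 h2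
    have hn : (hi : Int) - (lo : Int) = (((hi - lo : Nat)) : Int) := by omega
    have hlena : ((arr.drop lo).take (hi - lo)).length = hi - lo := by
      simp [List.length_take, List.length_drop]; omega
    cases ev with
    | true =>
      have htle : PySem.List.clampIdx (hi - lo) (x + 1) ≤ hi - lo := PySem.List.clampIdx_le _ _
      have hstep : goB (x :: q) true (lo : Int) (hi : Int)
          = goB q false (lo : Int) (((lo + PySem.List.clampIdx (hi - lo) (x + 1) : Nat)) : Int) := by
        simp only [goB, hn]
        rw [clampStep]
        simp
      have hga : goA (x :: q) true ((arr.drop lo).take (hi - lo))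
          = goA q false ((arr.drop lo).take ((lo + PySem.List.clampIdx (hi - lo) (x + 1)) - lo)) := by
        simp only [goA, slice_zero_some, hlena]
        rw [List.take_take, min_eq_left htle]
        congr 2
        omega
      obtain ⟨lo2, hi2, hg, hle, hlen, hseg⟩ :=
        ih false lo (lo + PySem.List.clampIdx (hi - lo) (x + 1)) (by omega) (by omega)
      exact ⟨lo2, hi2, by rw [hstep, hg], hle, hlen, by rw [hga, hseg]⟩
    | false =>
      have htle : PySem.List.clampIdx (hi - lo) x ≤ hi - lo := PySem.List.clampIdx_le _ _
      have hstep : goB (x :: q) false (lo : Int) (hi : Int)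
          = goB q true (((lo + PySem.List.clampIdx (hi - lo) x : Nat)) : Int) (hi : Int) := by
        simp only [goB, hn]
        rw [clampStep]
        simp
      have hga : goA (x :: q) false ((arr.drop lo).take (hi - lo))
          = goA q true ((arr.drop (lo + PySem.List.clampIdx (hi - lo) x)).take (hi - (lo + PySem.List.clampIdx (hi - lo) x))) := by
        simp only [goA, PySem.List.slice_some_none, hlena]
        rw [List.drop_take, List.drop_drop]
        congr 2
        omega
      obtain ⟨lo2, hi2, hg, hle, hlen, hseg⟩ :=
        ih true (lo + PySem.List.clampIdx (hi - lo) x) hi (by omega) h2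
      exact ⟨lo2, hi2, by rw [hstep, hg], hle, hlen, by rw [hga, hseg]⟩

-- ===== VERDICT (by name: the statement is the Claim_ definition above) =====
theorem solution_spec : Claim_equal_solution := by
  intro arr query _
  unfold Spec_solution
  have hA : solution arr query = goA query true arr := by
    have h := A_loop query [] arr query (by simp)
    simpa [solution] using h
  obtain ⟨lo2, hi2, hgo, hle, hlen, hseg⟩ :=
    goA_goB arr query true 0 arr.length (Nat.zero_le _) le_rfl
  simp only [Nat.cast_zero] at hgo
  have hB : solution_alt arr query
      = PySem.List.slice arr (some ((lo2 : Int))) (some ((hi2 : Int))) := by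
    have h := B_loop query 0 0 ((arr.length : Nat) : Int)
    simp only [Nat.cast_zero] at h
    unfold solution_alt
    rw [h]
    norm_num
    rw [hgo]
  rw [hA, hB, PySem.List.slice_natCast]
  simpa using hseg
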